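-- pv_equiv track=rewrite | github.com/lohjs-0/converter-bases | conversor-bases/converter.py | _dec_to_bin_manual
-- ===== SOURCE A (Python) =====
-- def _dec_to_bin_manual(decimal: int) -> list:
--     lines = ["── Decimal → Binário (divisões por 2) ──"]
--     if decimal == 0:
--         lines += ["  0 ÷ 2 = 0  resto 0", "  Resultado: 0"]
--         return lines
--     n, steps = decimal, []
--     while n > 0:
--         steps.append((n, n // 2, n % 2))
--         n //= 2
--     for orig, quot, rem in steps:
--         lines.append(f"  {orig:>6} ÷ 2 = {quot:<6} resto {rem}")
--     lines.append("  Lendo os restos de baixo para cima: "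
--                  + "".join(str(s[2]) for s in reversed(steps)))
--     return lines
-- ===== SOURCE B (Python) =====
-- def _dec_to_bin_manual(decimal: int) -> list:
--     lines = ["── Decimal → Binário (divisões por 2) ──"]
--     if decimal == 0:
--         lines += ["  0 ÷ 2 = 0  resto 0", "  Resultado: 0"]
--         return lines
--     n, bits = decimal, ""
--     while n > 0:
--         quot, rem = n // 2, n % 2
--         lines.append(f"  {n:>6} ÷ 2 = {quot:<6} resto {rem}")
--         bits = str(rem) + bits
--         n = quot
--     lines.append("  Lendo os restos de baixo para cima: " + bits)
--     return lines
-- ===== Notes on version B (the rewrite author's own statement) =====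
-- stated objective: simpler
-- what changed: B replaces A's collect-steps list plus two extra passes (a formatting loop and a reversed-join) with a single division loop that formats each line immediately and prepends each remainder to a running bits string, so no intermediate list of tuples is built.
import Mathlib
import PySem

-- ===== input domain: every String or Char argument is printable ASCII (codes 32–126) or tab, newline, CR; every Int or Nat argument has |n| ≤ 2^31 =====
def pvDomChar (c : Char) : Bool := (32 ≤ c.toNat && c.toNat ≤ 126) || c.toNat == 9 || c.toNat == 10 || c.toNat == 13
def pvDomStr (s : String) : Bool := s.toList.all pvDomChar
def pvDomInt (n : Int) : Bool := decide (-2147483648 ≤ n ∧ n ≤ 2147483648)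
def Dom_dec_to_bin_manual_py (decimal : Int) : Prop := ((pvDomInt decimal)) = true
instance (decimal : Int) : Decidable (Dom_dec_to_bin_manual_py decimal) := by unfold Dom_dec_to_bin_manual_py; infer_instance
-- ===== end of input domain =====

-- B fuses A's collect-steps loop, formatting pass and reversed-join into one division loop
-- with a prepended bits accumulator (objective: simpler — no intermediate step list).

-- shared formatting helper: f"  {orig:>6} ÷ 2 = {quot:<6} resto {rem}" (pad with spaces to width 6, no truncation)
def pvRjust6 (s : String) : String :=
  String.ofList (List.replicate (6 - s.toList.length) ' ' ++ s.toList)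

def pvLjust6 (s : String) : String :=
  String.ofList (s.toList ++ List.replicate (6 - s.toList.length) ' ')

def pvFmtLine (orig quot rem : Int) : String :=
  "  " ++ pvRjust6 (PySem.Int.toStr orig) ++ " ÷ 2 = " ++ pvLjust6 (PySem.Int.toStr quot)
       ++ " resto " ++ PySem.Int.toStr rem

-- ===== PORT A =====
-- while n > 0: steps.append((n, n // 2, n % 2)); n //= 2
def pvStepsA (n : Int) : List (Int × Int × Int) :=
  if h : n > 0 then
    (n, PySem.Int.floordiv n 2, PySem.Int.mod n 2) :: pvStepsA (PySem.Int.floordiv n 2)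
  else []
termination_by n.toNat
decreasing_by
  have h2 : PySem.Int.floordiv n 2 = n / 2 := PySem.Int.floordiv_eq_ediv_of_pos (by omega)
  rw [h2]; omega

def dec_to_bin_manual_py (decimal : Int) : List String :=
  let lines : List String := ["── Decimal → Binário (divisões por 2) ──"]
  if decimal == 0 then
    lines ++ ["  0 ÷ 2 = 0  resto 0", "  Resultado: 0"]
  else
    let steps := pvStepsA decimal
    let lines := lines ++ steps.map (fun s => pvFmtLine s.1 s.2.1 s.2.2)
    lines ++ ["  Lendo os restos de baixo para cima: "
              ++ PySem.Str.join "" (steps.reverse.map (fun s => PySem.Int.toStr s.2.2))]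

-- ===== PORT B =====
-- while n > 0: lines.append(line); bits = str(rem) + bits; n = quot
def pvLoopB (n : Int) (lines : List String) (bits : String) : List String × String :=
  if h : n > 0 then
    let quot := PySem.Int.floordiv n 2
    let rem := PySem.Int.mod n 2
    pvLoopB quot (lines ++ [pvFmtLine n quot rem]) (PySem.Int.toStr rem ++ bits)
  else (lines, bits)
termination_by n.toNat
decreasing_by
  have h2 : PySem.Int.floordiv n 2 = n / 2 := PySem.Int.floordiv_eq_ediv_of_pos (by omega)
  rw [h2]; omega

def dec_to_bin_manual_py_alt (decimal : Int) : List String :=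
  let lines : List String := ["── Decimal → Binário (divisões por 2) ──"]
  if decimal == 0 then
    lines ++ ["  0 ÷ 2 = 0  resto 0", "  Resultado: 0"]
  else
    let r := pvLoopB decimal lines ""
    r.1 ++ ["  Lendo os restos de baixo para cima: " ++ r.2]

-- ===== PRECONDITION & SPEC =====
def Spec_dec_to_bin_manual_py (decimal : Int) (out : List String) : Prop := out = dec_to_bin_manual_py_alt decimal
instance (decimal : Int) (out : List String) : Decidable (Spec_dec_to_bin_manual_py decimal out) := by unfold Spec_dec_to_bin_manual_py; infer_instance

-- ===== CLAIM (what is proved, stated in full; the proofs are below) =====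
def Claim_equal_dec_to_bin_manual_py : Prop := ∀ (decimal : Int), Dom_dec_to_bin_manual_py decimal → Spec_dec_to_bin_manual_py decimal (dec_to_bin_manual_py decimal)

-- ===== LEMMAS AND PROOFS =====

theorem pvInterNil (xs : List (List Char)) : List.intercalate ([] : List Char) xs = xs.flatten := by
  induction xs with
  | nil => simp [List.intercalate]
  | cons a t ih =>
    cases t with
    | nil => simp [List.intercalate]
    | cons b t2 =>
      simp [List.intercalate, List.intersperse] at *
      simpa [List.intercalate, List.intersperse] using ih

theorem pvStrInj (a b : String) (h : a.toList = b.toList) : a = b := by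
  have := congrArg String.ofList h; simpa using this

theorem pvJoinEmpty_append (l : List String) (s : String) :
    PySem.Str.join "" (l ++ [s]) = PySem.Str.join "" l ++ s := by
  apply pvStrInj
  simp [PySem.Str.toList_join, PySem.Chars.join, pvInterNil]

theorem pvJoinEmpty_nil : PySem.Str.join "" ([] : List String) = "" := by
  apply pvStrInj
  simp [PySem.Str.toList_join, PySem.Chars.join, pvInterNil]

-- the invariant for B's fused loop, phrased against A's step list
theorem pvLoopB_eq (n : Int) (lines : List String) (bits : String) :
    pvLoopB n lines bits =
      (lines ++ (pvStepsA n).map (fun s => pvFmtLine s.1 s.2.1 s.2.2),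
       PySem.Str.join "" ((pvStepsA n).reverse.map (fun s => PySem.Int.toStr s.2.2)) ++ bits) := by
  fun_induction pvLoopB n lines bits with
  | case1 n lines bits h quot rem ih =>
    rw [pvStepsA]
    simp only [h, dif_pos, ih, List.map_cons, List.reverse_cons, List.map_append,
      List.map_cons, List.map_nil, pvJoinEmpty_append, List.append_assoc,
      List.singleton_append, String.append_assoc]
    rfl
  | case2 n lines bits h =>
    rw [pvStepsA]
    simp [h, pvJoinEmpty_nil]

-- ===== VERDICT (by name: the statement is the Claim_ definition above) =====
theorem dec_to_bin_manual_py_spec : Claim_equal_dec_to_bin_manual_py := by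
  intro decimal _
  unfold Spec_dec_to_bin_manual_py dec_to_bin_manual_py dec_to_bin_manual_py_alt
  by_cases h : decimal == 0
  · simp [h]
  · simp only [h, pvLoopB_eq]
    simp
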